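-- pv_equiv track=rewrite | github.com/SuhyunRim118/Algorithm | 프로그래머스/3/68646. 풍선 터트리기/풍선 터트리기.py | solution
-- ===== SOURCE A (Python) =====
-- def solution(a):
--     answer = 2
--
--     left = [a[0]]
--     right = [a[-1]]
--
--     for i in range(1, len(a)):
--         if a[i]<left[i-1]:
--             left.append(a[i])
--         else:
--             left.append(left[i-1])
--
--         if a[len(a)-i-1]<right[i-1]:
--             right.append(a[len(a)-i-1])
--         else:
--             right.append(right[i-1])
--
--     right.reverse()
--
--     for i in range(1, len(a)-1):
--         if a[i]<left[i-1] or a[i]<right[i+1]: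
--             answer+=1
--
--     return answer
-- ===== SOURCE B (Python) =====
-- def solution(a):
--     # Record-counting with inclusion-exclusion: a balloon survives iff it is a
--     # strict prefix-minimum record (forward scan) or a strict suffix-minimum
--     # record (backward scan); an index counted by both is exactly a unique
--     # interior global minimum, so subtract that overlap computed via min/count.
--     n = len(a)
--     fwd = 0
--     m = a[0]
--     for i in range(1, n - 1):
--         if a[i] < m:
--             fwd += 1
--             m = a[i]
--     bwd = 0
--     m = a[-1]
--     for i in range(n - 2, 0, -1):
--         if a[i] < m:
--             bwd += 1
--             m = a[i]
--     g = min(a)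
--     overlap = 1 if a.count(g) == 1 and a[0] != g and a[-1] != g else 0
--     return 2 + fwd + bwd - overlap
-- ===== Notes on version B (the rewrite author's own statement) =====
-- stated objective: alternative
-- what changed: Replaces A's prefix/suffix minimum arrays and combined-condition counting loop by record counting with inclusion-exclusion: count strict prefix-minimum records forward, strict suffix-minimum records backward, and subtract the overlap, which is exactly a unique interior global minimum detected via min() and count().
import Mathlib
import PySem

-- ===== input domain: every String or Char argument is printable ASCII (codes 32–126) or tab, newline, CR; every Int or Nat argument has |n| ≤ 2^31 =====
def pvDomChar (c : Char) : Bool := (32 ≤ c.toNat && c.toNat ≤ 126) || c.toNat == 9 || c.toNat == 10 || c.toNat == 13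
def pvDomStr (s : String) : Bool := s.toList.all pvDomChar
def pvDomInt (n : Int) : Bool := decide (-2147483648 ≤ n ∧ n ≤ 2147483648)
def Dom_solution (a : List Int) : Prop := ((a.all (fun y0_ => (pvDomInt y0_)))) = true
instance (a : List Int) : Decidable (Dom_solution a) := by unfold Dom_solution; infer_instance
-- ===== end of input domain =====

-- B replaces A's prefix/suffix-minimum arrays and combined-condition count by
-- record counting with inclusion-exclusion (forward records + backward records
-- minus the unique-interior-global-minimum overlap found via min/count).
-- Objective: alternative decomposition, same O(n).

-- ===== PORT A =====
def solution (a : List Int) : Int :=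
  let n : Int := a.length
  let lr := (PySem.List.pyRange 1 n 1).foldl
    (fun (s : List Int × List Int) i =>
      ((if PySem.List.pyGetD a i 0 < PySem.List.pyGetD s.1 (i-1) 0
        then s.1 ++ [PySem.List.pyGetD a i 0]
        else s.1 ++ [PySem.List.pyGetD s.1 (i-1) 0]),
       (if PySem.List.pyGetD a (n-i-1) 0 < PySem.List.pyGetD s.2 (i-1) 0
        then s.2 ++ [PySem.List.pyGetD a (n-i-1) 0]
        else s.2 ++ [PySem.List.pyGetD s.2 (i-1) 0])))
    ([PySem.List.pyGetD a 0 0], [PySem.List.pyGetD a (-1) 0])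
  let left := lr.1
  let right := lr.2.reverse
  (PySem.List.pyRange 1 (n-1) 1).foldl
    (fun answer i =>
      if PySem.List.pyGetD a i 0 < PySem.List.pyGetD left (i-1) 0 ∨
         PySem.List.pyGetD a i 0 < PySem.List.pyGetD right (i+1) 0
      then answer + 1 else answer)
    2

-- ===== PORT B =====
def solution_alt (a : List Int) : Int :=
  let n : Int := a.length
  -- forward scan: count strict prefix-minimum records among interior indices
  let f := (PySem.List.pyRange 1 (n-1) 1).foldl
    (fun (st : Int × Int) i =>
      ((if PySem.List.pyGetD a i 0 < st.2 then st.1 + 1 else st.1),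
       (if PySem.List.pyGetD a i 0 < st.2 then PySem.List.pyGetD a i 0 else st.2)))
    ((0 : Int), PySem.List.pyGetD a 0 0)
  -- backward scan: count strict suffix-minimum records among interior indices
  let b := (PySem.List.pyRange (n-2) 0 (-1)).foldl
    (fun (st : Int × Int) i =>
      ((if PySem.List.pyGetD a i 0 < st.2 then st.1 + 1 else st.1),
       (if PySem.List.pyGetD a i 0 < st.2 then PySem.List.pyGetD a i 0 else st.2)))
    ((0 : Int), PySem.List.pyGetD a (-1) 0)
  -- overlap: an index counted by both scans is exactly a unique interior global minimum
  let g := (PySem.List.min? a (fun x => x)).getD 0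
  let overlap : Int :=
    if PySem.List.count a g = 1 ∧ PySem.List.pyGetD a 0 0 ≠ g ∧ PySem.List.pyGetD a (-1) 0 ≠ g
    then 1 else 0
  2 + f.1 + b.1 - overlap

-- ===== PRECONDITION & SPEC =====
-- Pre_ excludes only the empty list, on which A raises IndexError (a[0]).
def Pre_solution (a : List Int) : Prop := a ≠ []
instance (a : List Int) : Decidable (Pre_solution a) := by unfold Pre_solution; infer_instance
def pvWitness_solution : List Int := ([-16, 27, 65, 28, 29, 22, 64, 83])

def Spec_solution (a : List Int) (out : Int) : Prop := out = solution_alt a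
instance (a : List Int) (out : Int) : Decidable (Spec_solution a out) := by unfold Spec_solution; infer_instance

-- ===== CLAIM (what is proved, stated in full; the proofs are below) =====
def Claim_equal_solution : Prop := ∀ (a : List Int), Dom_solution a → Pre_solution a → Spec_solution a (solution a)

-- ===== LEMMAS AND PROOFS =====

-- prefix minimum: pmv a k = min(a[0..k]) (index clamped by getD beyond the end)
def pmv (a : List Int) : Nat → Int
  | 0 => a.getD 0 0
  | k+1 => min (pmv a k) (a.getD (k+1) 0)

-- suffix minimum: smv a j = min(a[j..n-1])
def smv (a : List Int) (j : Nat) : Int := pmv a.reverse (a.length - 1 - j)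

-- Boolean record predicates over an interior index i (given as an Int ≥ 1)
def PB (a : List Int) (i : Int) : Bool := decide (a.getD i.toNat 0 < pmv a (i.toNat - 1))
def QB (a : List Int) (i : Int) : Bool := decide (a.getD i.toNat 0 < smv a (i.toNat + 1))

-- canonical count-loop body of A (proof helper)
def cbody (a : List Int) (ans : Int) (i : Int) : Int :=
  if a.getD i.toNat 0 < pmv a (i.toNat - 1) ∨ a.getD i.toNat 0 < smv a (i.toNat + 1)
  then ans + 1 else ans

lemma if_lt_min (x c : Int) : (if x < c then x else c) = min c x := by
  split_ifs with h
  · exact (min_eq_right h.le).symm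
  · exact (min_eq_left (not_lt.mp h)).symm

lemma getD_map_range_f (f : Nat → Int) (n j : Nat) (hj : j < n) :
    ((List.range n).map f).getD j 0 = f j := by
  rw [List.getD_eq_getElem?_getD]
  simp [hj]

lemma getD_reverse_map_range (f : Nat → Int) (n j : Nat) (hj : j < n) :
    (((List.range n).map f).reverse).getD j 0 = f (n - 1 - j) := by
  rw [List.getD_eq_getElem?_getD]
  rw [List.getElem?_eq_getElem (by simpa using hj)]
  simp [List.getElem_reverse]

-- A's left list: running prefix minima
lemma A_left (a : List Int) (k : Nat) :
    (PySem.List.pyRange 1 (1 + (k : Int)) 1).foldl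
      (fun (left : List Int) i =>
        if PySem.List.pyGetD a i 0 < PySem.List.pyGetD left (i-1) 0
        then left ++ [PySem.List.pyGetD a i 0]
        else left ++ [PySem.List.pyGetD left (i-1) 0])
      [PySem.List.pyGetD a 0 0]
    = (List.range (k+1)).map (pmv a) := by
  induction k with
  | zero =>
    simp [PySem.List.pyRange_one_eq_nil, pmv]
    simp [PySem.List.pyGetD_zero]
  | succ k ih =>
    have h1 : (1 : Int) ≤ 1 + (k : Int) := by omega
    have hsplit : (1 : Int) + ((k : Nat) + 1 : Nat) = (1 + (k : Int)) + 1 := by push_cast; ring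
    rw [hsplit, PySem.List.pyRange_one_succ_right h1, List.foldl_append]
    rw [ih]
    simp only [List.foldl_cons, List.foldl_nil]
    have hcast : (1 + (k : Int)) = ((k + 1 : Nat) : Int) := by push_cast; ring
    rw [hcast]
    rw [show ((k + 1 : Nat) : Int) - 1 = ((k : Nat) : Int) by omega]
    rw [PySem.List.pyGetD_natCast, PySem.List.pyGetD_natCast]
    rw [getD_map_range_f (pmv a) (k+1) k (by omega)]
    rw [← apply_ite (fun x => (List.range (k+1)).map (pmv a) ++ [x])]
    rw [show (if a.getD (k+1) 0 < pmv a k then a.getD (k+1) 0 else pmv a k) = min (pmv a k) (a.getD (k+1) 0) from if_lt_min _ _]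
    conv_rhs => rw [List.range_succ]
    simp [pmv]

lemma getD_reverse (a : List Int) (j : Nat) (hj : j < a.length) :
    a.reverse.getD j 0 = a.getD (a.length - 1 - j) 0 := by
  rw [List.getD_eq_getElem?_getD, List.getD_eq_getElem?_getD]
  rw [List.getElem?_eq_getElem (by simpa using hj), List.getElem?_eq_getElem (by omega)]
  simp [List.getElem_reverse]

-- A's right list (before the final reverse): running minima from the back
lemma A_right (a : List Int) (h : a ≠ []) (k : Nat) (hk : k ≤ a.length - 1) :
    (PySem.List.pyRange 1 (1 + (k : Int)) 1).foldl
      (fun (right : List Int) i =>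
        if PySem.List.pyGetD a ((a.length : Int) - i - 1) 0 < PySem.List.pyGetD right (i-1) 0
        then right ++ [PySem.List.pyGetD a ((a.length : Int) - i - 1) 0]
        else right ++ [PySem.List.pyGetD right (i-1) 0])
      [PySem.List.pyGetD a (-1) 0]
    = (List.range (k+1)).map (pmv a.reverse) := by
  have hn : 1 ≤ a.length := List.length_pos_iff.mpr h
  have hbase : PySem.List.pyGetD a (-1) 0 = pmv a.reverse 0 := by
    rw [PySem.List.pyGetD_neg_one a 0 h]
    show _ = a.reverse.getD 0 0
    rw [getD_reverse a 0 (by omega), List.getLast_eq_getElem]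
    rw [List.getD_eq_getElem?_getD, List.getElem?_eq_getElem (by omega)]
    simp
  induction k with
  | zero =>
    simp [PySem.List.pyRange_one_eq_nil, hbase]
  | succ k ih =>
    have h1 : (1 : Int) ≤ 1 + (k : Int) := by omega
    have hsplit : (1 : Int) + ((k : Nat) + 1 : Nat) = (1 + (k : Int)) + 1 := by push_cast; ring
    rw [hsplit, PySem.List.pyRange_one_succ_right h1, List.foldl_append]
    rw [ih (by omega)]
    simp only [List.foldl_cons, List.foldl_nil]
    rw [show (1 + (k : Int)) - 1 = ((k : Nat) : Int) by omega]
    rw [show ((a.length : Int) - (1 + (k : Int)) - 1) = ((a.length - k - 2 : Nat) : Int) by omega]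
    rw [PySem.List.pyGetD_natCast, PySem.List.pyGetD_natCast]
    rw [getD_map_range_f (pmv a.reverse) (k+1) k (by omega)]
    rw [← apply_ite (fun x => (List.range (k+1)).map (pmv a.reverse) ++ [x])]
    rw [if_lt_min]
    conv_rhs => rw [List.range_succ]
    have harev : a.reverse.getD (k+1) 0 = a.getD (a.length - k - 2) 0 := by
      rw [getD_reverse a (k+1) (by omega)]
      congr 1
      omega
    simp only [List.getD_eq_getElem?_getD] at harev
    simp [pmv, harev]

lemma smv_step (a : List Int) (h : a ≠ []) (j : Nat) (hj : j < a.length) :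
    smv a j = min (a.getD j 0) (smv a (j+1)) := by
  have hn : 1 ≤ a.length := List.length_pos_iff.mpr h
  unfold smv
  rcases Nat.lt_or_ge j (a.length - 1) with hj1 | hj1
  · rw [show a.length - 1 - j = (a.length - 1 - (j+1)) + 1 by omega]
    show pmv a.reverse _ = _
    rw [pmv]
    rw [min_comm]
    congr 1
    rw [getD_reverse a (a.length - 1 - (j+1) + 1) (by omega)]
    congr 1
    omega
  · have hj2 : j = a.length - 1 := by omega
    subst hj2
    rw [show a.length - 1 - (a.length - 1) = 0 by omega,
        show a.length - 1 - (a.length - 1 + 1) = 0 by omega]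
    have : a.reverse.getD 0 0 = a.getD (a.length - 1) 0 := getD_reverse a 0 (by omega)
    show pmv a.reverse 0 = min _ (pmv a.reverse 0)
    rw [pmv, this]
    exact (min_self _).symm

lemma getD_last_smv (a : List Int) (h : a ≠ []) :
    PySem.List.pyGetD a (-1) 0 = smv a (a.length - 1) := by
  have hn : 1 ≤ a.length := List.length_pos_iff.mpr h
  rw [PySem.List.pyGetD_neg_one a 0 h]
  show _ = pmv a.reverse (a.length - 1 - (a.length - 1))
  rw [show a.length - 1 - (a.length - 1) = 0 by omega]
  show _ = a.reverse.getD 0 0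
  rw [getD_reverse a 0 (by omega), List.getLast_eq_getElem]
  rw [List.getD_eq_getElem?_getD, List.getElem?_eq_getElem (by omega)]
  simp

-- B's forward pass: pair fold = (record count, running prefix min)
lemma B_fwd (a : List Int) :
    ∀ k : Nat, (k : Int) ≤ (a.length : Int) - 2 →
    (PySem.List.pyRange 1 (1 + (k : Int)) 1).foldl
      (fun (st : Int × Int) i =>
        ((if PySem.List.pyGetD a i 0 < st.2 then st.1 + 1 else st.1),
         (if PySem.List.pyGetD a i 0 < st.2 then PySem.List.pyGetD a i 0 else st.2)))
      ((0 : Int), PySem.List.pyGetD a 0 0)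
    = (((PySem.List.pyRange 1 (1 + (k : Int)) 1).countP (PB a) : Int), pmv a k) := by
  intro k
  induction k with
  | zero =>
    intro _
    rw [PySem.List.pyRange_one_eq_nil (by omega)]
    simp [PySem.List.pyGetD_zero, pmv]
  | succ k ih =>
    intro hk
    have h1 : (1 : Int) ≤ 1 + (k : Int) := by omega
    have hsplit : (1 : Int) + ((k : Nat) + 1 : Nat) = (1 + (k : Int)) + 1 := by push_cast; ring
    rw [hsplit, PySem.List.pyRange_one_succ_right h1, List.foldl_append, List.countP_append]
    rw [ih (by omega)]
    simp only [List.foldl_cons, List.foldl_nil, List.countP_cons, List.countP_nil]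
    have hc1 : (1 + (k : Int)) = ((k + 1 : Nat) : Int) := by push_cast; ring
    rw [hc1, PySem.List.pyGetD_natCast]
    have hPB : PB a ((k + 1 : Nat) : Int) = decide (a.getD (k+1) 0 < pmv a k) := by
      unfold PB
      simp
    rw [hPB, Prod.mk.injEq]
    constructor
    · simp only [decide_eq_true_eq]
      split_ifs <;> push_cast <;> ring
    · rw [if_lt_min]
      show min (pmv a k) (a.getD (k+1) 0) = pmv a (k+1)
      rw [pmv]

-- B's backward pass: first component counts suffix-minimum records
lemma B_bwd (a : List Int) (h : a ≠ []) :
    ∀ j : Nat, (j : Int) ≤ (a.length : Int) - 2 → ∀ c : Int,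
    ((PySem.List.pyRange (j : Int) 0 (-1)).foldl
      (fun (st : Int × Int) i =>
        ((if PySem.List.pyGetD a i 0 < st.2 then st.1 + 1 else st.1),
         (if PySem.List.pyGetD a i 0 < st.2 then PySem.List.pyGetD a i 0 else st.2)))
      (c, smv a (j + 1))).1
    = c + ((PySem.List.pyRange (j : Int) 0 (-1)).countP (QB a) : Int) := by
  intro j
  induction j with
  | zero =>
    intro _ c
    rw [PySem.List.pyRange_neg_one_eq_nil (by omega)]
    simp
  | succ j ih =>
    intro hj c
    rw [PySem.List.pyRange_neg_one_cons (by push_cast; omega), List.foldl_cons, List.countP_cons]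
    simp only []
    rw [show ((j + 1 : Nat) : Int) - 1 = ((j : Nat) : Int) by push_cast; ring]
    rw [PySem.List.pyGetD_natCast]
    have hsm : (if a.getD (j+1) 0 < smv a (j + 1 + 1) then a.getD (j+1) 0 else smv a (j + 1 + 1)) = smv a (j + 1) := by
      rw [if_lt_min, min_comm, ← smv_step a h (j+1) (by omega)]
    have hQB : QB a ((j + 1 : Nat) : Int) = decide (a.getD (j+1) 0 < smv a (j + 1 + 1)) := by
      unfold QB
      simp
    rw [hQB, hsm]
    by_cases hlt : a.getD (j+1) 0 < smv a (j + 1 + 1)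
    · simp only [if_pos hlt]
      rw [ih (by omega) (c+1)]
      simp only [hlt, decide_true]
      push_cast
      ring
    · simp only [if_neg hlt]
      rw [ih (by omega) c]
      simp only [hlt, decide_false]
      simp

-- inclusion-exclusion on counts, pointwise over any list
lemma countP_or_and (l : List Int) (p q : Int → Bool) :
    l.countP (fun i => p i || q i) + l.countP (fun i => p i && q i)
    = l.countP p + l.countP q := by
  induction l with
  | nil => simp
  | cons x t ih =>
    simp only [List.countP_cons]
    have hb : ∀ (b c : Bool), (if (b || c) = true then 1 else 0) + (if (b && c) = true then 1 else 0)
        = (if b = true then 1 else 0) + (if c = true then 1 else 0) := by decide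
    have := hb (p x) (q x)
    omega

-- x < pmv a k ↔ x is below every prefix element
lemma pmv_lt_iff (a : List Int) (x : Int) (k : Nat) :
    x < pmv a k ↔ ∀ j : Nat, j ≤ k → x < a.getD j 0 := by
  induction k with
  | zero =>
    constructor
    · intro hx j hj
      rw [Nat.le_zero.mp hj]
      exact hx
    · intro hx
      exact hx 0 (le_refl 0)
  | succ k ih =>
    show x < min (pmv a k) (a.getD (k+1) 0) ↔ _
    rw [lt_min_iff, ih]
    constructor
    · rintro ⟨h1, h2⟩ j hj
      rcases Nat.lt_or_ge j (k+1) with hlt | hge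
      · exact h1 j (by omega)
      · rw [show j = k+1 by omega]; exact h2
    · intro hall
      exact ⟨fun j hj => hall j (by omega), hall (k+1) (le_refl _)⟩

-- x < smv a j ↔ x is below every suffix element (j < n)
lemma smv_lt_iff (a : List Int) (x : Int) (j : Nat) (hj : j < a.length) :
    x < smv a j ↔ ∀ t : Nat, j ≤ t → t < a.length → x < a.getD t 0 := by
  have hn : 1 ≤ a.length := by omega
  unfold smv
  rw [pmv_lt_iff]
  constructor
  · intro hrev t ht htn
    have hi : a.length - 1 - t ≤ a.length - 1 - j := by omega
    have := hrev (a.length - 1 - t) hi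
    rw [getD_reverse a (a.length - 1 - t) (by omega)] at this
    rw [show a.length - 1 - (a.length - 1 - t) = t by omega] at this
    exact this
  · intro hall i hi
    rw [getD_reverse a i (by omega)]
    exact hall (a.length - 1 - i) (by omega) (by omega)

-- counting a predicate over List.range: exactly-one and at-least-two helpers
lemma countP_range_eq_one (m : Nat) (p : Nat → Bool) (t : Nat) (ht : t < m)
    (hp : p t = true) (hu : ∀ k, k < m → p k = true → k = t) :
    (List.range m).countP p = 1 := by
  rw [show m = t + (m - t) by omega, List.range_add, List.countP_append]
  have h0 : (List.range t).countP p = 0 := by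
    rw [List.countP_eq_zero]
    intro k hk hpk
    simp only [List.mem_range] at hk
    have := hu k (by omega) hpk
    omega
  rw [h0, List.countP_map]
  rw [show m - t = (m - t - 1) + 1 by omega, List.range_succ_eq_map]
  rw [List.countP_cons, List.countP_map]
  have h1 : (List.range (m - t - 1)).countP ((p ∘ fun x => t + x) ∘ Nat.succ) = 0 := by
    rw [List.countP_eq_zero]
    intro k hk hpk
    simp only [Function.comp] at hpk
    have := hu (t + (k + 1)) (by simp [List.mem_range] at hk; omega) (by simpa using hpk)
    omega
  rw [h1]
  simp [Function.comp, hp]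

lemma two_le_countP_range (m : Nat) (p : Nat → Bool) (s t : Nat) (hst : s < t)
    (ht : t < m) (hs : p s = true) (hpt : p t = true) :
    2 ≤ (List.range m).countP p := by
  rw [show m = t + (m - t) by omega, List.range_add, List.countP_append]
  have h1 : 0 < (List.range t).countP p :=
    List.countP_pos_iff.mpr ⟨s, List.mem_range.mpr (by omega), hs⟩
  have h2 : 0 < (List.map (fun x => t + x) (List.range (m - t))).countP p := by
    rw [List.countP_map]
    exact List.countP_pos_iff.mpr ⟨0, List.mem_range.mpr (by omega), by simpa using hpt⟩
  omega

-- List.count as a positional count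
lemma count_eq_countP_range (l : List Int) (v : Int) :
    l.count v = (List.range l.length).countP (fun j => l.getD j 0 == v) := by
  induction l with
  | nil => simp
  | cons x t ih =>
    rw [List.count_cons, ih]
    rw [show (x :: t).length = t.length + 1 by simp, List.range_succ_eq_map]
    rw [List.countP_cons, List.countP_map]
    have : (List.range t.length).countP ((fun j => (x :: t).getD j 0 == v) ∘ Nat.succ)
        = (List.range t.length).countP (fun j => t.getD j 0 == v) := by
      apply List.countP_congr
      intro k _
      rfl
    rw [this]
    by_cases hxv : (x == v) = true
    · simp [hxv]
    · simp [hxv]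

-- an index strictly below every other element
def Uq (a : List Int) (t : Nat) : Prop :=
  ∀ j : Nat, j < a.length → j ≠ t → a.getD t 0 < a.getD j 0

-- for an interior index, 'prefix record and suffix record' = 'unique strict minimum'
lemma both_iff_uq (a : List Int) (t : Nat) (h1 : 1 ≤ t) (h2 : t + 2 ≤ a.length) :
    (a.getD t 0 < pmv a (t-1) ∧ a.getD t 0 < smv a (t+1)) ↔ Uq a t := by
  rw [pmv_lt_iff, smv_lt_iff a _ (t+1) (by omega)]
  constructor
  · rintro ⟨hl, hr⟩ j hj hne
    rcases Nat.lt_or_ge j t with hlt | hge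
    · exact hl j (by omega)
    · exact hr j (by omega) hj
  · intro hu
    exact ⟨fun j hj => hu j (by omega) (by omega), fun u hu1 hu2 => hu u hu2 (by omega)⟩

lemma uq_unique (a : List Int) (t t' : Nat) (ht : t < a.length) (ht' : t' < a.length)
    (h1 : Uq a t) (h2 : Uq a t') : t = t' := by
  by_contra hne
  have := h1 t' ht' (fun e => hne e.symm)
  have := h2 t ht hne
  omega

-- the overlap count equals B's unique-interior-global-minimum indicator
lemma overlap_eq (a : List Int) (h : a ≠ []) :
    ((PySem.List.pyRange 1 ((a.length : Int) - 1) 1).countP (fun i => PB a i && QB a i) : Int)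
    = (if PySem.List.count a ((PySem.List.min? a (fun x => x)).getD 0) = 1 ∧
          PySem.List.pyGetD a 0 0 ≠ (PySem.List.min? a (fun x => x)).getD 0 ∧
          PySem.List.pyGetD a (-1) 0 ≠ (PySem.List.min? a (fun x => x)).getD 0
       then (1 : Int) else 0) := by
  have hn : 1 ≤ a.length := List.length_pos_iff.mpr h
  obtain ⟨m, hm⟩ : ∃ m, PySem.List.min? a (fun x => x) = some m := by
    cases hmin : PySem.List.min? a (fun x => x) with
    | none => exact absurd ((PySem.List.min?_eq_none_iff a _).mp hmin) h
    | some m => exact ⟨m, rfl⟩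
  set g := (PySem.List.min? a (fun x => x)).getD 0 with hgdef
  have hgm : g = m := by rw [hgdef, hm]; rfl
  have hg_mem : g ∈ a := by rw [hgm]; exact PySem.List.min?_mem hm
  have hg_min : ∀ j : Nat, j < a.length → g ≤ a.getD j 0 := by
    intro j hj
    rw [List.getD_eq_getElem a 0 hj, hgm]
    exact PySem.List.min?_isMin hm _ (a.getElem_mem hj)
  have hlast : PySem.List.pyGetD a (-1) 0 = a.getD (a.length - 1) 0 := by
    rw [PySem.List.pyGetD_neg_one a 0 h, List.getLast_eq_getElem, List.getD_eq_getElem a 0 (by omega)]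
  have hzero : PySem.List.pyGetD a 0 0 = a.getD 0 0 := PySem.List.pyGetD_zero a 0
  rw [PySem.List.pyRange_one, List.countP_map]
  rw [show ((a.length : Int) - 1 - 1).toNat = a.length - 2 by omega]
  have hpred : ∀ k : Nat, k < a.length - 2 →
      (((fun i => PB a i && QB a i) ∘ (fun k : Nat => 1 + (k : Int))) k = true ↔ Uq a (k+1)) := by
    intro k hk
    simp only [Function.comp, PB, QB, Bool.and_eq_true, decide_eq_true_eq]
    rw [show ((1 : Int) + (k : Nat)).toNat = k + 1 by omega]
    rw [show k + 1 - 1 = k by omega]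
    have := both_iff_uq a (k+1) (by omega) (by omega)
    rw [show k + 1 - 1 = k by omega] at this
    exact this
  by_cases hex : ∃ t : Nat, 1 ≤ t ∧ t + 2 ≤ a.length ∧ Uq a t
  · obtain ⟨t, ht1, ht2, htu⟩ := hex
    have hat : a.getD t 0 = g := by
      obtain ⟨j0, hj0, hj0e⟩ := List.mem_iff_getElem.mp hg_mem
      rw [← List.getD_eq_getElem a 0 hj0] at hj0e
      by_cases hjt : j0 = t
      · rw [← hj0e, hjt]
      · exfalso
        have h1 := htu j0 hj0 hjt
        have h2 := hg_min t (by omega)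
        omega
    have hcount : PySem.List.count a g = 1 := by
      rw [PySem.List.count_eq, count_eq_countP_range]
      apply countP_range_eq_one _ _ t (by omega)
      · simp only [beq_iff_eq]; exact hat
      · intro k hk hpk
        simp only [beq_iff_eq] at hpk
        by_contra hne
        have := htu k hk hne
        omega
    have hc2 : PySem.List.pyGetD a 0 0 ≠ g := by
      rw [hzero]
      intro he
      have h1 := htu 0 (by omega) (by omega)
      omega
    have hc3 : PySem.List.pyGetD a (-1) 0 ≠ g := by
      rw [hlast]
      intro he
      have h1 := htu (a.length - 1) (by omega) (by omega)
      omega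
    rw [if_pos ⟨hcount, hc2, hc3⟩]
    have hone : (List.range (a.length - 2)).countP
        ((fun i => PB a i && QB a i) ∘ (fun k : Nat => 1 + (k : Int))) = 1 := by
      apply countP_range_eq_one _ _ (t-1) (by omega)
      · apply (hpred (t-1) (by omega)).mpr
        rw [show t - 1 + 1 = t by omega]
        exact htu
      · intro k hk hpk
        have huk := (hpred k hk).mp hpk
        have := uq_unique a (k+1) t (by omega) (by omega) huk htu
        omega
    rw [hone]
    norm_num
  · have hzeroCount : (List.range (a.length - 2)).countP
        ((fun i => PB a i && QB a i) ∘ (fun k : Nat => 1 + (k : Int))) = 0 := by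
      rw [List.countP_eq_zero]
      intro k hk
      simp only [List.mem_range] at hk
      intro hpk
      exact hex ⟨k+1, by omega, by omega, (hpred k hk).mp hpk⟩
    rw [hzeroCount, if_neg]
    · norm_num
    rintro ⟨hc1, hc2, hc3⟩
    obtain ⟨t, ht, hte⟩ := List.mem_iff_getElem.mp hg_mem
    have hat : a.getD t 0 = g := by rw [List.getD_eq_getElem a 0 ht]; exact hte
    have huq : Uq a t := by
      intro j hj hjt
      have hle := hg_min j hj
      rcases lt_or_eq_of_le hle with hlt | heq
      · omega
      · exfalso
        rw [PySem.List.count_eq, count_eq_countP_range] at hc1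
        have h2 : 2 ≤ (List.range a.length).countP (fun j => a.getD j 0 == g) := by
          rcases Nat.lt_or_ge j t with hlt2 | hge2
          · exact two_le_countP_range _ _ j t (by omega) ht
              (by simp only [beq_iff_eq]; exact heq.symm) (by simp only [beq_iff_eq]; exact hat)
          · exact two_le_countP_range _ _ t j (by omega) hj
              (by simp only [beq_iff_eq]; exact hat) (by simp only [beq_iff_eq]; exact heq.symm)
        omega
    have ht1 : 1 ≤ t := by
      rcases Nat.eq_zero_or_pos t with h0 | hp
      · exfalso; apply hc2; rw [hzero, ← hat, h0]
      · exact hp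
    have ht2 : t + 2 ≤ a.length := by
      by_contra hgt
      apply hc3
      rw [hlast, ← hat, show a.length - 1 = t by omega]
    exact hex ⟨t, ht1, ht2, huq⟩

-- A's value in record-count form
lemma A_count (a : List Int) (h : a ≠ []) :
    solution a = 2 + (((PySem.List.pyRange 1 ((a.length : Int) - 1) 1).countP
      (fun i => PB a i || QB a i)) : Int) := by
  have hn : 1 ≤ a.length := List.length_pos_iff.mpr h
  unfold solution
  simp only []
  rw [PySem.List.foldl_prod_mk
    (f := fun (left : List Int) i =>
      if PySem.List.pyGetD a i 0 < PySem.List.pyGetD left (i-1) 0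
      then left ++ [PySem.List.pyGetD a i 0]
      else left ++ [PySem.List.pyGetD left (i-1) 0])
    (g := fun (right : List Int) i =>
      if PySem.List.pyGetD a ((a.length : Int) - i - 1) 0 < PySem.List.pyGetD right (i-1) 0
      then right ++ [PySem.List.pyGetD a ((a.length : Int) - i - 1) 0]
      else right ++ [PySem.List.pyGetD right (i-1) 0])]
  rcases Nat.lt_or_ge a.length 2 with h2 | h2
  · rw [PySem.List.pyRange_one_eq_nil (a := 1) (b := (a.length : Int) - 1) (by omega)]
    simp
  · have hr : PySem.List.pyRange 1 ((a.length : Int)) 1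
        = PySem.List.pyRange 1 (1 + ((a.length - 1 : Nat) : Int)) 1 := by
      congr 1; omega
    rw [hr, A_left a (a.length - 1), A_right a h (a.length - 1) (le_refl _)]
    rw [show a.length - 1 + 1 = a.length by omega]
    rw [PySem.List.foldl_congr_mem (PySem.List.pyRange 1 ((a.length : Int) - 1) 1) _ (cbody a) 2 ?hcongr]
    case hcongr =>
      intro acc x hx
      rw [PySem.List.mem_pyRange_one] at hx
      have hx0 : x = ((x.toNat : Nat) : Int) := (Int.toNat_of_nonneg (by omega)).symm
      set t := x.toNat with ht
      have ht1 : 1 ≤ t := by omega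
      have ht2 : t < a.length - 1 := by omega
      rw [hx0]
      rw [show ((t : Nat) : Int) - 1 = ((t - 1 : Nat) : Int) by omega,
          show ((t : Nat) : Int) + 1 = ((t + 1 : Nat) : Int) by omega]
      rw [PySem.List.pyGetD_natCast, PySem.List.pyGetD_natCast, PySem.List.pyGetD_natCast]
      rw [getD_map_range_f (pmv a) a.length (t-1) (by omega)]
      rw [getD_reverse_map_range (pmv a.reverse) a.length (t+1) (by omega)]
      unfold cbody
      simp only [Int.toNat_natCast]
      rfl
    unfold cbody
    rw [PySem.List.foldl_ite_add_one]
    congr 2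
    apply List.countP_congr
    intro i _
    simp [PB, QB]

-- B's value in record-count form
lemma B_count_form (a : List Int) (h : a ≠ []) :
    solution_alt a = 2
      + (((PySem.List.pyRange 1 ((a.length : Int) - 1) 1).countP (PB a)) : Int)
      + (((PySem.List.pyRange 1 ((a.length : Int) - 1) 1).countP (QB a)) : Int)
      - (((PySem.List.pyRange 1 ((a.length : Int) - 1) 1).countP (fun i => PB a i && QB a i)) : Int) := by
  have hn : 1 ≤ a.length := List.length_pos_iff.mpr h
  unfold solution_alt
  simp only []
  rw [← overlap_eq a h]
  rcases Nat.lt_or_ge a.length 2 with h2 | h2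
  · rw [PySem.List.pyRange_one_eq_nil (a := 1) (b := (a.length : Int) - 1) (by omega),
        PySem.List.pyRange_neg_one_eq_nil (a := (a.length : Int) - 2) (b := 0) (by omega)]
    simp
  · have hf : ((a.length : Int) - 1) = 1 + ((a.length - 2 : Nat) : Int) := by omega
    rw [hf, B_fwd a (a.length - 2) (by omega)]
    have hb0 : PySem.List.pyGetD a (-1) 0 = smv a ((a.length - 2) + 1) := by
      rw [getD_last_smv a h, show a.length - 2 + 1 = a.length - 1 by omega]
    have hbr : ((a.length : Int) - 2) = ((a.length - 2 : Nat) : Int) := by omega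
    rw [hb0, hbr, B_bwd a h (a.length - 2) (by omega) 0]
    rw [PySem.List.pyRange_neg_one_eq_reverse, List.countP_reverse]
    rw [show (0 : Int) + 1 = 1 by ring, show ((a.length - 2 : Nat) : Int) + 1 = 1 + ((a.length - 2 : Nat) : Int) by ring]
    simp only []
    ring

-- ===== VERDICT (by name: the statement is the Claim_ definition above) =====
theorem solution_spec : Claim_equal_solution := by
  intro a _ hpre
  have h : a ≠ [] := hpre
  unfold Spec_solution
  rw [A_count a h, B_count_form a h]
  have hie := countP_or_and (PySem.List.pyRange 1 ((a.length : Int) - 1) 1) (PB a) (QB a)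
  omega
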